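-- pv_equiv track=rewrite | github.com/richjohnson-wwt/nat-wof | ai_player/src/ai_player/state_manager.py | _mask_from_answer_and_revealed
-- ===== SOURCE A (Python) =====
-- def _mask_from_answer_and_revealed(answer: str, revealed_positions: list[int]) -> str:
--     """Produce the masked puzzle string using underscores and '*' for spaces.
--
--     Example: "STEAK KNIFE" -> "_ _ _ _ _ * _ _ _ _ _"
--     """
--     out = []
--     for idx, ch in enumerate(answer or ""):
--         if ch == " ":
--             out.append("*")
--         elif ch.isalpha():
--             out.append(ch.upper() if idx in revealed_positions else "_")
--         else:
--             out.append(ch)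
--     return " ".join(out)
-- ===== SOURCE B (Python) =====
-- def _mask_from_answer_and_revealed(answer: str, revealed_positions: list[int]) -> str:
--     """Masked puzzle string: classify every character first, then reveal by position."""
--     s = answer or ""
--     out = ["*" if ch == " " else "_" if ch.isalpha() else ch for ch in s]
--     for pos in revealed_positions:
--         if 0 <= pos < len(s) and s[pos] != " ":
--             out[pos] = s[pos].upper()
--     return " ".join(out)
-- ===== Notes on version B (the rewrite author's own statement) =====
-- stated objective: faster
-- what changed: B builds the full mask by pure per-character classification in one pass, then applies the revealed positions in a separate bounds-checked update pass, removing the per-character membership scan of revealed_positions.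
import Mathlib
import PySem

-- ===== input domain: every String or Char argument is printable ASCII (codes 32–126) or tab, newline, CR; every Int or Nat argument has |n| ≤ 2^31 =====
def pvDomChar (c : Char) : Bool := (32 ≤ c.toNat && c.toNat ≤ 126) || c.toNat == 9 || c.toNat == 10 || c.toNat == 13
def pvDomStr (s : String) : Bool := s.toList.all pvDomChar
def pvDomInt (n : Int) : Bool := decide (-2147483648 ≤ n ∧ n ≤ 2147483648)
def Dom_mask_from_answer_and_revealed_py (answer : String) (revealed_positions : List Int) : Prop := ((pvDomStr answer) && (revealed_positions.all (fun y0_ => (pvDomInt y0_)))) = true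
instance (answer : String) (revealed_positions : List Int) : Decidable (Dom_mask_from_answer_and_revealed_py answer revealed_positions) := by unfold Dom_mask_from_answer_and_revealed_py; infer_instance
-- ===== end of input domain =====

-- B classifies every character in one pass, then reveals letters in a separate
-- position-driven bounds-checked pass, instead of testing index membership inside
-- the per-character loop; equivalence of the two is proved on the whole domain.


-- ===== PORT A =====
-- literal port of A: one loop over enumerate(answer), membership test inside
def mask_from_answer_and_revealed_py (answer : String) (revealed_positions : List Int) : String :=
  let out : List String :=
    (PySem.List.enumerate answer.toList 0).foldl
      (fun acc p =>
        if p.2 = ' ' then acc ++ ["*"]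
        else if PySem.Chars.isalpha p.2 then
          acc ++ [if p.1 ∈ revealed_positions then String.mk [PySem.Chars.upperChar p.2] else "_"]
        else acc ++ [String.mk [p.2]])
      []
  PySem.Str.join " " out

-- ===== PORT B =====
-- literal port of B: classification map, then a reveal pass over the positions
def mask_from_answer_and_revealed_py_alt (answer : String) (revealed_positions : List Int) : String :=
  let cs := answer.toList
  let base : List String :=
    cs.map (fun ch => if ch = ' ' then "*" else if PySem.Chars.isalpha ch then "_" else String.mk [ch])
  let out : List String :=
    revealed_positions.foldl
      (fun acc pos =>
        if 0 ≤ pos ∧ pos < (cs.length : Int) ∧ cs.getD pos.toNat ' ' ≠ ' ' then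
          acc.set pos.toNat (String.mk [PySem.Chars.upperChar (cs.getD pos.toNat ' ')])
        else acc)
      base
  PySem.Str.join " " out

-- ===== PRECONDITION & SPEC =====
def Spec_mask_from_answer_and_revealed_py (answer : String) (revealed_positions : List Int) (out : String) : Prop := out = mask_from_answer_and_revealed_py_alt answer revealed_positions
instance (answer : String) (revealed_positions : List Int) (out : String) : Decidable (Spec_mask_from_answer_and_revealed_py answer revealed_positions out) := by unfold Spec_mask_from_answer_and_revealed_py; infer_instance

-- ===== CLAIM (what is proved, stated in full; the proofs are below) =====
def Claim_equal_mask_from_answer_and_revealed_py : Prop := ∀ (answer : String) (revealed_positions : List Int), Dom_mask_from_answer_and_revealed_py answer revealed_positions → Spec_mask_from_answer_and_revealed_py answer revealed_positions (mask_from_answer_and_revealed_py answer revealed_positions)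

-- ===== LEMMAS AND PROOFS =====

-- B's reveal fold preserves the length
theorem pv_foldl_set_length (cs : List Char) (rev : List Int) (acc : List String) :
    (rev.foldl
      (fun acc pos =>
        if 0 ≤ pos ∧ pos < (cs.length : Int) ∧ cs.getD pos.toNat ' ' ≠ ' ' then
          acc.set pos.toNat (String.mk [PySem.Chars.upperChar (cs.getD pos.toNat ' ')])
        else acc)
      acc).length = acc.length := by
  induction rev generalizing acc with
  | nil => rfl
  | cons p ps ih => simp only [List.foldl]; rw [ih]; split_ifs <;> simp

-- element-wise characterisation of B's reveal fold
theorem pv_foldl_set_getElem? (cs : List Char) (rev : List Int) (acc : List String)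
    (hlen : acc.length = cs.length) (i : Nat) (hi : i < cs.length) :
    (rev.foldl
      (fun acc pos =>
        if 0 ≤ pos ∧ pos < (cs.length : Int) ∧ cs.getD pos.toNat ' ' ≠ ' ' then
          acc.set pos.toNat (String.mk [PySem.Chars.upperChar (cs.getD pos.toNat ' ')])
        else acc)
      acc)[i]? =
    if ((i : Int) ∈ rev ∧ cs.getD i ' ' ≠ ' ') then
      some (String.mk [PySem.Chars.upperChar (cs.getD i ' ')])
    else acc[i]? := by
  induction rev generalizing acc with
  | nil => simp
  | cons p ps ih =>
    simp only [List.foldl]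
    by_cases hp : 0 ≤ p ∧ p < (cs.length : Int) ∧ cs.getD p.toNat ' ' ≠ ' '
    · rw [if_pos hp, ih _ (by simp [hlen])]
      by_cases hmem : (i : Int) ∈ ps ∧ cs.getD i ' ' ≠ ' '
      · rw [if_pos hmem, if_pos ⟨List.mem_cons_of_mem _ hmem.1, hmem.2⟩]
      · rw [if_neg hmem]
        by_cases hpi : p.toNat = i
        · have hpi' : p = (i : Int) := by omega
          have hG : cs.getD i ' ' ≠ ' ' := by rw [← hpi]; exact hp.2.2
          rw [if_pos ⟨by simp [hpi'], hG⟩, hpi]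
          simp [hlen, hi]
        · have : ¬ (((i : Int) ∈ p :: ps) ∧ cs.getD i ' ' ≠ ' ') := by
            rintro ⟨hm, hG⟩
            rcases List.mem_cons.mp hm with h | h
            · exact hpi (by omega)
            · exact hmem ⟨h, hG⟩
          rw [if_neg this, List.getElem?_set_ne (by omega)]
    · rw [if_neg hp, ih _ hlen]
      by_cases hmem : (i : Int) ∈ ps ∧ cs.getD i ' ' ≠ ' '
      · rw [if_pos hmem, if_pos ⟨List.mem_cons_of_mem _ hmem.1, hmem.2⟩]
      · rw [if_neg hmem]
        have : ¬ (((i : Int) ∈ p :: ps) ∧ cs.getD i ' ' ≠ ' ') := by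
          rintro ⟨hm, hG⟩
          rcases List.mem_cons.mp hm with h | h
          · subst h
            exact hp ⟨by omega, by
              constructor
              · exact_mod_cast hi
              · simpa using hG⟩
          · exact hmem ⟨h, hG⟩
        rw [if_neg this]

-- upper of a non-alphabetic character is itself
theorem pv_upperChar_of_not_alpha (c : Char) (h : PySem.Chars.isalpha c = false) :
    PySem.Chars.upperChar c = c := by
  rw [PySem.Chars.isalpha] at h
  rw [PySem.Chars.upperChar, if_neg]
  simp only [Bool.or_eq_false_iff] at h
  simp [h.2]

-- A's loop, written with its branches, is the map of the per-pair classifier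
theorem pvA_fold_eq_map (rev : List Int) (l : List (Int × Char)) (acc : List String) :
    l.foldl
      (fun acc p =>
        if p.2 = ' ' then acc ++ ["*"]
        else if PySem.Chars.isalpha p.2 then
          acc ++ [if p.1 ∈ rev then String.mk [PySem.Chars.upperChar p.2] else "_"]
        else acc ++ [String.mk [p.2]])
      acc =
    acc ++ l.map (fun p =>
        if p.2 = ' ' then "*"
        else if PySem.Chars.isalpha p.2 then
          (if p.1 ∈ rev then String.mk [PySem.Chars.upperChar p.2] else "_")
        else String.mk [p.2]) := by
  induction l generalizing acc with
  | nil => simp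
  | cons x xs ih =>
    simp only [List.foldl, List.map]
    split_ifs <;> rw [ih] <;> simp

-- ===== VERDICT (by name: the statement is the Claim_ definition above) =====
theorem mask_from_answer_and_revealed_py_spec : Claim_equal_mask_from_answer_and_revealed_py := by
  intro answer rev _
  unfold Spec_mask_from_answer_and_revealed_py
  unfold mask_from_answer_and_revealed_py mask_from_answer_and_revealed_py_alt
  set cs := answer.toList with hcs
  simp only []
  congr 1
  rw [pvA_fold_eq_map, List.nil_append]
  apply List.ext_getElem?
  intro i
  by_cases hi : i < cs.length
  · rw [pv_foldl_set_getElem? cs rev _ (by simp) i hi]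
    have hgetD : cs.getD i ' ' = cs[i] := by
      simp [List.getD_eq_getElem?_getD, List.getElem?_eq_getElem hi]
    rw [List.getElem?_map, PySem.List.getElem?_enumerate,
      List.getElem?_eq_getElem hi, List.getElem?_map, List.getElem?_eq_getElem hi]
    simp only [Option.map_some, hgetD, zero_add]
    by_cases hsp : cs[i] = ' '
    · simp [hsp]
    · by_cases hal : PySem.Chars.isalpha cs[i] = true
      · by_cases hm : (i : Int) ∈ rev <;> simp [hsp, hal, hm]
      · have hal' : PySem.Chars.isalpha cs[i] = false := by simpa using hal
        by_cases hm : (i : Int) ∈ rev <;>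
          simp [hsp, hal', hm, pv_upperChar_of_not_alpha _ hal']
  · rw [List.getElem?_eq_none (by simpa using hi),
      List.getElem?_eq_none (by rw [pv_foldl_set_length]; simpa using hi)]
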